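-- pv_equiv track=rewrite | github.com/frank26080115/jankworks | timelapse_stripes/timelapse_stripes.py | build_selection
-- ===== SOURCE A (Python) =====
-- def build_selection(files, total, interval):
--     if not files:
--         raise ValueError("No JPG/PNG images found in the directory.")
--     if total <= 0:
--         raise ValueError("--total must be a positive integer.")
--
--     step = interval if interval and interval > 0 else 1
--     out = []
--     n = len(files)
--     idx = 0
--     for _ in range(total):
--         out.append(files[idx % n])
--         idx += step
--     return out
-- ===== SOURCE B (Python) =====
-- def _gcd(a, b):
--     while b:
--         a, b = b, a % b
--     return a
--
--
-- def build_selection(files, total, interval):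
--     if not files:
--         raise ValueError("No JPG/PNG images found in the directory.")
--     if total <= 0:
--         raise ValueError("--total must be a positive integer.")
--     step = interval if interval and interval > 0 else 1
--     n = len(files)
--     period = n // _gcd(step, n)
--     pattern = [files[(i * step) % n] for i in range(period)]
--     reps = -(-total // period)
--     return (pattern * reps)[:total]
-- ===== Notes on version B (the rewrite author's own statement) =====
-- stated objective: alternative
-- what changed: Instead of A's loop that keeps a running index idx and computes files[idx % n] on every iteration, B precomputes the cycle of visited files once (period n // gcd(step, n)), tiles that pattern ceil(total/period) times and slices to total.
import Mathlib
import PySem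

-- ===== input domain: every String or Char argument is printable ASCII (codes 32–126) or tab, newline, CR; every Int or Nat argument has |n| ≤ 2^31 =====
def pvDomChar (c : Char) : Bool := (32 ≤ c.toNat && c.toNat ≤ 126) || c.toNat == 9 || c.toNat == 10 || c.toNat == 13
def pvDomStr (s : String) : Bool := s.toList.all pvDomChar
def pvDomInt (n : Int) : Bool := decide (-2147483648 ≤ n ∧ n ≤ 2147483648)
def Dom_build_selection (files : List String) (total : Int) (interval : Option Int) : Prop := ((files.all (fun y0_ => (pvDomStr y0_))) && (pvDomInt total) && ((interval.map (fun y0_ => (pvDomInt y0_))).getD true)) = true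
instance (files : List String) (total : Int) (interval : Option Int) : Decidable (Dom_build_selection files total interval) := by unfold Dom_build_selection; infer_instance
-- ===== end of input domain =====

-- B replaces A's running modular index by a precomputed gcd-period pattern that is tiled
-- and sliced to length (objective: alternative decomposition, same asymptotic cost).

-- ===== PORT A =====
-- 'step = interval if interval and interval > 0 else 1' : None and 0 are falsy
def build_selection (files : List String) (total : Int) (interval : Option Int) : List String :=
  let step : Int := match interval with
    | some i => if i ≠ 0 ∧ 0 < i then i else 1
    | none => 1
  let n : Int := files.length
  -- 'files[idx % n]' always hits 0 ≤ idx % n < n (n > 0 under Pre_), so pyGetD is exact here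
  ((PySem.List.pyRange 0 total 1).foldl
    (fun (st : List String × Int) _ =>
      (st.1 ++ [PySem.List.pyGetD files (PySem.Int.mod st.2 n) ""], st.2 + step))
    ([], 0)).1

-- ===== PORT B =====
-- Source B's hand-written Euclid loop '_gcd'
def pyGcdLoop (a b : Int) : Int :=
  if _hb : b = 0 then a
  else pyGcdLoop b (PySem.Int.mod a b)
termination_by b.natAbs
decreasing_by
  rcases lt_or_gt_of_ne _hb with h | h
  · have := PySem.Int.mod_neg_bounds a h
    omega
  · have h1 := PySem.Int.mod_nonneg a h
    have h2 := PySem.Int.mod_lt a h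
    omega

def build_selection_alt (files : List String) (total : Int) (interval : Option Int) : List String :=
  let step : Int := match interval with
    | some i => if i ≠ 0 ∧ 0 < i then i else 1
    | none => 1
  let n : Int := files.length
  let period : Int := PySem.Int.floordiv n (pyGcdLoop step n)
  let pattern : List String := (PySem.List.pyRange 0 period 1).map
    (fun i => PySem.List.pyGetD files (PySem.Int.mod (i * step) n) "")
  let reps : Int := -(PySem.Int.floordiv (-total) period)
  PySem.List.slice (PySem.List.pyRepeat pattern reps) none (some total)

-- ===== PRECONDITION & SPEC =====
-- Pre_ excludes exactly the inputs where A raises ValueError: empty files or total ≤ 0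
def Pre_build_selection (files : List String) (total : Int) (interval : Option Int) : Prop :=
  files ≠ [] ∧ 0 < total

instance (files : List String) (total : Int) (interval : Option Int) : Decidable (Pre_build_selection files total interval) := by unfold Pre_build_selection; infer_instance

def pvWitness_build_selection : List String × Int × Option Int := (["a", "b", "c"], 4, some 2)

def Spec_build_selection (files : List String) (total : Int) (interval : Option Int) (out : List String) : Prop := out = build_selection_alt files total interval
instance (files : List String) (total : Int) (interval : Option Int) (out : List String) : Decidable (Spec_build_selection files total interval out) := by unfold Spec_build_selection; infer_instance

-- ===== CLAIM (what is proved, stated in full; the proofs are below) =====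
def Claim_equal_build_selection : Prop := ∀ (files : List String) (total : Int) (interval : Option Int), Dom_build_selection files total interval → Pre_build_selection files total interval → Spec_build_selection files total interval (build_selection files total interval)

-- ===== LEMMAS AND PROOFS =====

-- A's loop: after m iterations, out holds g of idx, idx+step, …, idx+(m-1)·step
lemma loopA_eq (g : Int → String) (step : Int) (m : Nat) :
    ∀ (out : List String) (idx : Int),
    ((List.range m).foldl (fun (st : List String × Int) _ => (st.1 ++ [g st.2], st.2 + step)) (out, idx))
      = (out ++ (List.range m).map (fun (k : Nat) => g (idx + (k : Int) * step)), idx + m * step) := by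
  induction m with
  | zero => simp
  | succ m ih =>
    intro out idx
    rw [List.range_succ, List.foldl_append, List.map_append, ih]
    simp only [List.foldl_cons, List.foldl_nil, List.map_cons, List.map_nil, List.append_assoc]
    rw [Prod.mk.injEq]
    exact ⟨rfl, by push_cast; ring⟩

-- Source B's Euclid loop computes gcd on nonnegative inputs
lemma pyGcdLoop_eq (a b : Int) : 0 ≤ a → 0 ≤ b →
    pyGcdLoop a b = ((Nat.gcd a.toNat b.toNat : Nat) : Int) := by
  fun_induction pyGcdLoop a b with
  | case1 a =>
    intro ha _
    simp [Int.toNat_of_nonneg ha]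
  | case2 a b hb ih =>
    intro ha hb0
    have hbpos : 0 < b := lt_of_le_of_ne hb0 (Ne.symm hb)
    have hmod : PySem.Int.mod a b = a % b := PySem.Int.mod_eq_emod_of_pos hbpos
    have hmn : 0 ≤ a % b := Int.emod_nonneg a (by omega)
    rw [ih hb0 (by rw [hmod]; exact hmn)]
    congr 1
    rw [hmod]
    have h3 : (a % b).toNat = a.toNat % b.toNat := by
      rw [show a = ((a.toNat : Nat) : Int) from by omega, show b = ((b.toNat : Nat) : Int) from by omega,
        ← Int.natCast_mod, Int.toNat_natCast, Int.toNat_natCast, Int.toNat_natCast]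
    rw [h3, Nat.gcd_comm b.toNat, ← Nat.gcd_rec, Nat.gcd_comm]

-- tiling a pattern of period L: m copies of [f 0, …, f (L-1)] is f ∘ (· % L) on range (m·L)
lemma tile_eq {α : Type} (f : Nat → α) (L : Nat) (m : Nat) :
    (List.replicate m ((List.range L).map f)).flatten
      = (List.range (m * L)).map (fun k => f (k % L)) := by
  induction m with
  | zero => simp
  | succ m ih =>
    rw [List.replicate_succ, List.flatten_cons, ih, Nat.succ_mul, Nat.add_comm,
        List.range_add, List.map_append]
    congr 1
    · apply List.map_congr_left
      intro k hk
      rw [List.mem_range] at hk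
      rw [Nat.mod_eq_of_lt hk]
    · rw [List.map_map]
      apply List.map_congr_left
      intro k _
      simp [Nat.add_mod_left]


-- the whole equivalence, for an explicit positive step
lemma main_core (files : List String) (total step : Int)
    (hf : files ≠ []) (ht : 0 < total) (hstep : 0 < step) :
    ((PySem.List.pyRange 0 total 1).foldl
      (fun (st : List String × Int) _ =>
        (st.1 ++ [PySem.List.pyGetD files (PySem.Int.mod st.2 (files.length : Int)) ""], st.2 + step))
      ([], 0)).1
    = PySem.List.slice
        (PySem.List.pyRepeat
          ((PySem.List.pyRange 0 (PySem.Int.floordiv (files.length : Int) (pyGcdLoop step (files.length : Int))) 1).map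
            (fun i => PySem.List.pyGetD files (PySem.Int.mod (i * step) (files.length : Int)) ""))
          (-(PySem.Int.floordiv (-total) (PySem.Int.floordiv (files.length : Int) (pyGcdLoop step (files.length : Int))))))
        none (some total) := by
  set n : Int := (files.length : Int) with hndef
  have hn : 0 < n := by
    rw [hndef]
    have : files.length ≠ 0 := fun h => hf (List.eq_nil_of_length_eq_zero h)
    omega
  set g : Int → String := fun idx => PySem.List.pyGetD files (PySem.Int.mod (idx * step) n) "" with hgdef
  have hgcd : pyGcdLoop step n = ((Nat.gcd step.toNat n.toNat : Nat) : Int) :=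
    pyGcdLoop_eq step n (le_of_lt hstep) (le_of_lt hn)
  set G : Nat := Nat.gcd step.toNat n.toNat with hGdef
  have hGpos : 0 < G := Nat.gcd_pos_of_pos_right _ (by omega)
  set L : Nat := n.toNat / G with hLdef
  have hLpos : 0 < L := Nat.div_pos (Nat.le_of_dvd (by omega) (Nat.gcd_dvd_right _ _)) hGpos
  have hperiod : PySem.Int.floordiv n (pyGcdLoop step n) = (L : Int) := by
    rw [hgcd]
    have h0 : n = ((n.toNat : Nat) : Int) := by omega
    rw [h0, PySem.Int.floordiv_natCast]
  have hdvd : (n : Int) ∣ (L : Int) * step := by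
    have h1 : G ∣ step.toNat := Nat.gcd_dvd_left _ _
    have h2 : G ∣ n.toNat := Nat.gcd_dvd_right _ _
    obtain ⟨u, hu⟩ := h1
    have hGL : G * L = n.toNat := Nat.mul_div_cancel' h2
    have hLs : L * step.toNat = n.toNat * u := by
      rw [hu, ← hGL]; ring
    refine ⟨(u : Int), ?_⟩
    have hstepcast : step = ((step.toNat : Nat) : Int) := by omega
    have hncast : n = ((n.toNat : Nat) : Int) := by omega
    rw [hstepcast, hncast, ← Nat.cast_mul, ← Nat.cast_mul, hLs]
  -- key periodicity: g ((k % L : Nat)) = g k for every k : Nat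
  have hper : ∀ k : Nat, g ((k % L : Nat) : Int) = g (k : Int) := by
    intro k
    rw [hgdef]
    simp only
    congr 1
    rw [PySem.Int.mod_eq_emod_of_pos hn, PySem.Int.mod_eq_emod_of_pos hn]
    obtain ⟨u, hu⟩ := hdvd
    have hk : (k : Int) = ((k % L : Nat) : Int) + (k / L : Nat) * (L : Int) := by
      exact_mod_cast (Nat.mod_add_div' k L).symm
    rw [hk]
    have h2 : (((k % L : Nat) : Int) + ((k / L : Nat) : Int) * (L : Int)) * step
        = ((k % L : Nat) : Int) * step + n * (((k / L : Nat) : Int) * u) := by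
      rw [add_mul]
      congr 1
      rw [mul_assoc, hu]; ring
    rw [h2, Int.add_mul_emod_self_left]
  -- reps: the ceiling -(-total // L) covers total
  set reps : Int := -(PySem.Int.floordiv (-total) (L : Int)) with hrepsdef
  have hfd := PySem.Int.floordiv_mul_add_mod (-total) (L : Int)
  have hmnn := PySem.Int.mod_nonneg (-total) (Int.natCast_pos.mpr hLpos)
  have hrepsL : total ≤ reps * (L : Int) := by
    rw [hrepsdef]; nlinarith [hfd, hmnn]
  have hrepspos : 0 < reps := by
    by_cases hc : reps ≤ 0
    · have h4 : reps * (L : Int) ≤ 0 := mul_nonpos_of_nonpos_of_nonneg hc (by positivity)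
      omega
    · omega
  have htotle : total.toNat ≤ reps.toNat * L := by
    have h3 : (total.toNat : Int) ≤ ((reps.toNat * L : Nat) : Int) := by
      push_cast
      rw [Int.toNat_of_nonneg (le_of_lt ht), Int.toNat_of_nonneg (le_of_lt hrepspos)]
      exact hrepsL
    exact_mod_cast h3
  -- A side
  rw [PySem.List.pyRange_one 0 total, List.foldl_map, sub_zero]
  have hA := loopA_eq (fun idx => PySem.List.pyGetD files (PySem.Int.mod idx n) "") step total.toNat [] 0
  rw [hA]
  -- B side
  rw [hperiod]
  rw [PySem.List.pyRange_one 0 (L : Int), sub_zero, Int.toNat_natCast, List.map_map]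
  have hpat : (List.range L).map ((fun i => PySem.List.pyGetD files (PySem.Int.mod (i * step) n) "") ∘ fun (k : Nat) => (0 : Int) + (k : Int))
      = (List.range L).map (fun k : Nat => g (k : Int)) := by
    apply List.map_congr_left
    intro k _
    simp [hgdef]
  rw [hpat]
  unfold PySem.List.pyRepeat
  rw [tile_eq (fun k : Nat => g (k : Int)) L reps.toNat]
  rw [PySem.List.slice_to _ (le_of_lt ht)]
  rw [← List.map_take, List.take_range, Nat.min_eq_left htotle]
  simp only [List.nil_append]
  apply List.map_congr_left
  intro k _
  rw [hper k]
  simp [hgdef, zero_add, Int.mul_comm]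

-- ===== VERDICT (by name: the statement is the Claim_ definition above) =====
theorem build_selection_spec : Claim_equal_build_selection := by
  intro files total interval _ hpre
  obtain ⟨hf, ht⟩ := hpre
  unfold Spec_build_selection
  rcases interval with _ | i
  · simp only [build_selection, build_selection_alt]
    exact main_core files total 1 hf ht one_pos
  · by_cases h : i ≠ 0 ∧ 0 < i
    · simp only [build_selection, build_selection_alt, if_pos h]
      exact main_core files total i hf ht h.2
    · simp only [build_selection, build_selection_alt, if_neg h]
      exact main_core files total 1 hf ht one_pos
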